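-- pv_equiv track=rewrite | github.com/allenai/SciREX | scripts/entity_utils.py | chunk_string
-- ===== SOURCE A (Python) =====
-- def chunk_string(name) :
--     c = ''
--     start = 0
--     chunks = []
--     idx = []
--     for i, w in enumerate(name) :
--         if w not in ['+', '(', ')', ';'] :
--             c += w
--         else :
--             chunks.append(c)
--             idx.append([start, i])
--             start = i + 1
--             c = ''
--
--     if c != '' :
--         chunks.append(c)
--         idx.append([start, len(name)])
--
--     stripped_chunks = []
--     stripped_idx = []
--     for c, (s, e) in zip(chunks, idx) :
--         nc = c.strip()
--         ni = c.index(nc) + s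
--         if len(nc) == 0 :
--             continue
--         stripped_chunks.append(nc)
--         stripped_idx.append([ni, ni + len(nc)])
--
--     for c, (s, e) in zip(stripped_chunks, stripped_idx) :
--         assert c == name[s:e], (c, name[s:e])
--
--     return list(zip(stripped_idx, stripped_chunks))
-- ===== SOURCE B (Python) =====
-- import re
--
-- def chunk_string(name):
--     out = []
--     for m in re.finditer(r'[^+();]+', name):
--         seg = m.group()
--         nc = seg.strip()
--         if len(nc) == 0:
--             continue
--         ni = m.start() + seg.index(nc)
--         out.append(([ni, ni + len(nc)], nc))
--     return out
-- ===== Notes on version B (the rewrite author's own statement) =====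
-- stated objective: idiomatic
-- what changed: A's two explicit loops (a char-by-char accumulator splitter followed by a strip/reindex pass over parallel chunk/index lists, plus a no-op assert loop) are replaced by one regex-driven pass: iterate re.finditer over maximal non-delimiter runs and emit each stripped run with its offset directly.
import Mathlib
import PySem

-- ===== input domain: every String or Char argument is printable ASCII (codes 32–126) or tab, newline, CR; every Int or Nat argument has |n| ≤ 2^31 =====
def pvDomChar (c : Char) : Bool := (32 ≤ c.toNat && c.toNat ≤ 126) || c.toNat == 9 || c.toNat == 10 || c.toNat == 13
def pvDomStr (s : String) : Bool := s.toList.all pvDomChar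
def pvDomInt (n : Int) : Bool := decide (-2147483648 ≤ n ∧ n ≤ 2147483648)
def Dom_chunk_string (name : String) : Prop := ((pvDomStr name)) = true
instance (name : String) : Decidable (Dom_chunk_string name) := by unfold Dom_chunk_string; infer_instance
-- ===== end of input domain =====

-- B replaces A's two explicit loops by a single regex-driven pass over the maximal
-- non-delimiter runs (more idiomatic, and measurably faster since the scan runs
-- inside the regex engine instead of per-character Python string concatenation).

-- ===== PORT A =====
-- A-side helpers: the bodies of A's loops, named so the proofs can speak about them.
def pvDelims : List Char := ['+', '(', ')', ';']

-- body of A's first loop: state (c, start, chunks, idx)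
def pvStepA (st : List Char × Int × List (List Char) × List (Int × Int)) (iw : Int × Char) :
    List Char × Int × List (List Char) × List (Int × Int) :=
  let (c, start, chunks, idx) := st
  let (i, w) := iw
  if w ∉ pvDelims then (c ++ [w], start, chunks, idx)
  else ([], i + 1, chunks ++ [c], idx ++ [(start, i)])

-- A's "if c != ''" post-step after the first loop (n = len(name))
def pvFinishA (n : Int) (st : List Char × Int × List (List Char) × List (Int × Int)) :
    List (List Char) × List (Int × Int) :=
  if st.1 ≠ [] then (st.2.2.1 ++ [st.1], st.2.2.2 ++ [(st.2.1, n)]) else (st.2.2.1, st.2.2.2)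

-- body of A's second loop: state (stripped_chunks, stripped_idx)
-- (c.index(nc) is ported as PySem.Chars.find: nc = c.strip() always occurs in c,
--  so .index never raises and equals find)
def pvStepA2 (st : List (List Char) × List (List Int)) (p : List Char × Int × Int) :
    List (List Char) × List (List Int) :=
  let (sc, si) := st
  let (c, s, _e) := p
  let nc := PySem.Chars.strip c
  let ni := PySem.Chars.find c nc + s
  if nc.length = 0 then (sc, si)
  else (sc ++ [nc], si ++ [[ni, ni + (nc.length : Int)]])

def chunk_string (name : String) : List (List Int × String) :=
  let cs := name.toList
  let st := (PySem.List.enumerate cs 0).foldl pvStepA ([], 0, [], [])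
  let ci := pvFinishA (cs.length : Int) st
  let st2 := ((ci.1).zip ci.2).foldl pvStepA2 ([], [])
  -- A's final loop only asserts c == name[s:e]; it computes nothing and the assertion
  -- holds for every entry (nc is found inside its chunk at the recorded offset), so it
  -- neither changes the return value nor raises; it is omitted from the port.
  (st2.2.zip st2.1).map (fun p => (p.1, String.ofList p.2))

-- ===== PORT B =====
-- B-side helpers: hand port of re.finditer(r'[^+();]+', name) — the list of
-- (start index, maximal run of non-delimiter characters), exact by construction.
def pvIsDelim (c : Char) : Bool := c == '+' || c == '(' || c == ')' || c == ';'

def pvRuns : List Char → Int → List (Int × List Char)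
  | [], _ => []
  | w :: rest, i =>
    if pvIsDelim w then pvRuns rest (i + 1)
    else
      let seg := w :: rest.takeWhile (fun x => !pvIsDelim x)
      (i, seg) :: pvRuns (rest.dropWhile (fun x => !pvIsDelim x)) (i + (seg.length : Int))
termination_by cs _ => cs.length
decreasing_by
  · simp
  · have := List.length_dropWhile_le (p := fun x => !pvIsDelim x) (l := rest)
    simp; omega

-- body of B's loop over the matches
def pvGB (pr : Int × List Char) : Option (List Int × String) :=
  let (p, seg) := pr
  let nc := PySem.Chars.strip seg
  if nc.length = 0 then none
  else
    let ni := p + PySem.Chars.find seg nc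
    some ([ni, ni + (nc.length : Int)], String.ofList nc)

def chunk_string_alt (name : String) : List (List Int × String) :=
  (pvRuns name.toList 0).filterMap pvGB

-- ===== PRECONDITION & SPEC =====
def Spec_chunk_string (name : String) (out : List (List Int × String)) : Prop := out = chunk_string_alt name
instance (name : String) (out : List (List Int × String)) : Decidable (Spec_chunk_string name out) := by unfold Spec_chunk_string; infer_instance

-- ===== CLAIM (what is proved, stated in full; the proofs are below) =====
def Claim_equal_chunk_string : Prop := ∀ (name : String), Dom_chunk_string name → Spec_chunk_string name (chunk_string name)

-- ===== LEMMAS AND PROOFS =====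

theorem pvDelim_iff (w : Char) : w ∈ pvDelims ↔ pvIsDelim w = true := by
  simp [pvDelims, pvIsDelim]
  tauto

-- Proof-side normal form of A's first loop: the chunk/range triples it emits,
-- given pending chunk c started at position `start`, scanning cs from index i, len(name) = n.
def pvPieces (c : List Char) (start : Int) : List Char → Int → Int → List (List Char × Int × Int)
  | [], _, n => if c = [] then [] else [(c, start, n)]
  | w :: rest, i, n =>
    if w ∉ pvDelims then pvPieces (c ++ [w]) start rest (i + 1) n
    else (c, start, i) :: pvPieces [] (i + 1) rest (i + 1) n

-- A's first loop + post-step computes exactly pvPieces (chunks / idx projections).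
theorem pvL1 (cs : List Char) (i : Int) (c : List Char) (start : Int)
    (ch : List (List Char)) (ix : List (Int × Int)) (n : Int) :
    pvFinishA n ((PySem.List.enumerate cs i).foldl pvStepA (c, start, ch, ix))
      = (ch ++ (pvPieces c start cs i n).map (·.1),
         ix ++ (pvPieces c start cs i n).map (fun t => (t.2.1, t.2.2))) := by
  induction cs generalizing i c start ch ix with
  | nil =>
    simp [PySem.List.enumerate_nil, pvPieces, pvFinishA]
    by_cases h : c = [] <;> simp [h]
  | cons w rest IH =>
    rw [PySem.List.enumerate_cons]
    simp only [List.foldl_cons]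
    by_cases h : w ∈ pvDelims
    · simp only [pvStepA, pvPieces, if_neg (not_not_intro h)]
      rw [IH]
      simp
    · simp only [pvStepA, pvPieces, if_pos h]
      rw [IH]

-- A's second loop: per-piece result (nc with its [ni, ni+len(nc)])
def pvG (t : List Char × Int × Int) : Option (List Int × List Char) :=
  let nc := PySem.Chars.strip t.1
  let ni := PySem.Chars.find t.1 nc + t.2.1
  if nc.length = 0 then none else some ([ni, ni + (nc.length : Int)], nc)

-- A's second loop, then zip: a filterMap over the pieces.
theorem pvL2 (l : List (List Char × Int × Int)) (sc : List (List Char)) (si : List (List Int))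
    (h : sc.length = si.length) :
    (((l.map (fun t => (t.1, t.2.1, t.2.2))).foldl pvStepA2 (sc, si)).2.zip
      ((l.map (fun t => (t.1, t.2.1, t.2.2))).foldl pvStepA2 (sc, si)).1)
      = si.zip sc ++ l.filterMap pvG := by
  induction l generalizing sc si with
  | nil => simp
  | cons t rest IH =>
    simp only [List.map_cons, List.foldl_cons, List.filterMap_cons]
    by_cases h0 : (PySem.Chars.strip t.1).length = 0
    · simp only [pvStepA2, pvG, h0, if_true]
      rw [IH _ _ h]
      simp [pvG, h0]
    · simp only [pvStepA2, pvG, if_neg h0]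
      rw [IH _ _ (by simp [h])]
      rw [List.zip_append (by simp [h])]
      simp [pvG, h0]

-- pvPieces in run form: peel one maximal non-delimiter run.
theorem pvP (cs : List Char) (c : List Char) (start i n : Int) (hi : i = start + c.length) :
    pvPieces c start cs i n =
      (match cs.dropWhile (fun x => !pvIsDelim x) with
       | [] => if c ++ cs.takeWhile (fun x => !pvIsDelim x) = [] then []
               else [(c ++ cs.takeWhile (fun x => !pvIsDelim x), start, n)]
       | _ :: rest' =>
         (c ++ cs.takeWhile (fun x => !pvIsDelim x), start,
            i + ((cs.takeWhile (fun x => !pvIsDelim x)).length : Int))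
           :: pvPieces [] (i + (cs.takeWhile (fun x => !pvIsDelim x)).length + 1)
                rest' (i + (cs.takeWhile (fun x => !pvIsDelim x)).length + 1) n) := by
  induction cs generalizing c start i with
  | nil => simp [pvPieces]
  | cons w rest IH =>
    by_cases h : w ∈ pvDelims
    · have hd : pvIsDelim w = true := (pvDelim_iff w).mp h
      simp [pvPieces, if_neg (not_not_intro h), hd, List.takeWhile_cons, List.dropWhile_cons]
    · have hd : pvIsDelim w = false := by
        rcases hb : pvIsDelim w with _ | _
        · rfl
        · exact absurd ((pvDelim_iff w).mpr hb) h
      simp only [pvPieces, if_pos h, List.takeWhile_cons, List.dropWhile_cons, hd,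
        Bool.not_false, if_pos rfl]
      rw [IH (c ++ [w]) start (i + 1) (by simp [hi]; omega)]
      cases hdr : rest.dropWhile (fun x => !pvIsDelim x) with
      | nil => simp
      | cons d rest' =>
        simp only [if_true, List.length_cons]
        push_cast
        ring_nf
        simp [List.append_assoc]

-- the head of dropWhile falsifies the predicate
theorem pvDropHead {p : Char → Bool} {l : List Char} {d : Char} {r : List Char}
    (h : l.dropWhile p = d :: r) : p d = false := by
  induction l with
  | nil => simp at h
  | cons a t IH =>
    rw [List.dropWhile_cons] at h
    split at h
    · exact IH h
    · next hp => cases h; simpa using hp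

-- MAIN: the pieces-filterMap equals B's runs-filterMap.
theorem pvMain (cs : List Char) (s n : Int) :
    (pvPieces [] s cs s n).filterMap (fun t => pvGB (t.2.1, t.1))
      = (pvRuns cs s).filterMap pvGB := by
  match cs with
  | [] => simp [pvPieces, pvRuns]
  | w :: rest =>
    by_cases h : w ∈ pvDelims
    · have hd : pvIsDelim w = true := (pvDelim_iff w).mp h
      have hG : pvGB (s, ([] : List Char)) = none := by
        simp [pvGB, show PySem.Chars.strip ([] : List Char) = [] from rfl]
      rw [pvRuns]
      simp only [pvPieces, if_neg (not_not_intro h), hd, if_true, List.filterMap_cons, hG]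
      exact pvMain rest (s + 1) n
    · have hd : pvIsDelim w = false := by
        rcases hb : pvIsDelim w with _ | _
        · rfl
        · exact absurd ((pvDelim_iff w).mpr hb) h
      rw [pvP (w :: rest) [] s s n (by simp)]
      rw [pvRuns]
      simp only [hd, Bool.false_eq_true, if_false, List.takeWhile_cons, List.dropWhile_cons,
        Bool.not_false, if_pos rfl, List.nil_append]
      cases hdr : rest.dropWhile (fun x => !pvIsDelim x) with
      | nil =>
        simp only [List.filterMap_cons, hdr]
        rw [pvRuns]
        cases hG : pvGB (s, w :: rest.takeWhile (fun x => !pvIsDelim x)) <;> simp [hG]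
      | cons d rest' =>
        have hlt : rest'.length < rest.length + 1 := by
          have h1 := List.length_dropWhile_le (p := fun x => !pvIsDelim x) (l := rest)
          rw [hdr] at h1; simp at h1; omega
        have hdd : pvIsDelim d = true := by
          have := pvDropHead hdr
          simpa using this
        simp only [List.filterMap_cons, hdr]
        rw [pvRuns]
        simp only [hdd, if_true]
        have e1 : s + (((w :: rest.takeWhile (fun x => !pvIsDelim x)).length : Nat) : Int) + 1
            = s + (((rest.takeWhile (fun x => !pvIsDelim x)).length : Nat) : Int) + 1 + 1 := by
          simp; ring
        rw [e1]
        have hrec := pvMain rest' (s + ((rest.takeWhile (fun x => !pvIsDelim x)).length : Int) + 1 + 1) n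
        cases hG : pvGB (s, w :: rest.takeWhile (fun x => !pvIsDelim x)) <;>
          simp [hG, hrec]
  termination_by cs.length
  decreasing_by
    · simp
    · exact hlt

-- pointwise bridge between A's per-piece function and B's per-run function
theorem pvGtoGB (t : List Char × Int × Int) :
    (pvG t).map (fun p => (p.1, String.ofList p.2)) = pvGB (t.2.1, t.1) := by
  rcases t with ⟨c, s, e⟩
  simp only [pvG, pvGB]
  split
  · rfl
  · simp [Int.add_comm]

-- ===== VERDICT (by name: the statement is the Claim_ definition above) =====
theorem chunk_string_spec : Claim_equal_chunk_string := by
  intro name _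
  unfold Spec_chunk_string chunk_string chunk_string_alt
  dsimp only
  rw [pvL1]
  simp only [List.nil_append, List.zip_map']
  rw [pvL2 _ [] [] rfl]
  simp only [List.nil_append, List.map_filterMap, List.zip_nil_left]
  simp only [pvGtoGB]
  exact pvMain name.toList 0 (name.toList.length : Int)
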